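-- pv_equiv track=rewrite | github.com/alexandraback/datacollection | solutions_5738606668808192_0/Python/Peter2000/Googlecode_Qual_3_CoinJam.py | solve
-- ===== SOURCE A (Python) =====
-- def solve(series):
--     prev_val = True
--     changes = 0
--     for i in range(len(series)-1,-1,-1):
--         if(prev_val != series[i]):
--             changes+=1
--             prev_val = series[i]
--     return changes
-- ===== SOURCE B (Python) =====
-- def solve(series):
--     # Count the maximal runs of equal values, then turn that into the number
--     # of value changes seen by A's backward scan seeded with True:
--     # changes = runs - 1, plus one more if the scan's first element (series[-1])
--     # differs from the True seed.
--     if not series: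
--         return 0
--     runs = 0
--     i = 0
--     n = len(series)
--     while i < n:
--         v = series[i]
--         while i < n and series[i] == v:
--             i += 1
--         runs += 1
--     return runs - 1 + (1 if series[-1] != True else 0)
-- ===== Notes on version B (the rewrite author's own statement) =====
-- stated objective: alternative
-- what changed: Replaces A's backward element-wise scan threading a previous-value accumulator by a run-length view: an index loop that jumps over whole maximal runs counts the runs, and the answer is the closed formula runs - 1 plus a single boundary comparison of series[-1] against the True seed.
import Mathlib
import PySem

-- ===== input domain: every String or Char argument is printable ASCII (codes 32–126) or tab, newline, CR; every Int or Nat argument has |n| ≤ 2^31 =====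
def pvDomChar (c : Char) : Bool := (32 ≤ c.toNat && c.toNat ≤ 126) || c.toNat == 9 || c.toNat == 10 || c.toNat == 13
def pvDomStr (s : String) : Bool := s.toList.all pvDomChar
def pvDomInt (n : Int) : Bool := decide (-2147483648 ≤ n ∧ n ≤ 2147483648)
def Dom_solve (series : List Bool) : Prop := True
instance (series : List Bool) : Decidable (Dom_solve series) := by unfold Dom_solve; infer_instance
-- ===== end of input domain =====

-- B replaces A's backward accumulator scan by counting maximal runs (an index loop that
-- jumps over whole runs) and a closed formula runs - 1 + boundary (alternative; same cost).

-- ===== PORT A =====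
-- backward loop over range(len-1, -1, -1) threading (prev_val, changes)
def solve (series : List Bool) : Int :=
  ((PySem.List.pyRange ((series.length : Int) - 1) (-1) (-1)).foldl
    (fun (s : Bool × Int) i =>
      if s.1 ≠ PySem.List.pyGetD series i false then (PySem.List.pyGetD series i false, s.2 + 1) else s)
    (true, 0)).2

-- ===== PORT B =====
-- inner while: advance i past the run of value v (while i < n and series[i] == v: i += 1);
-- fuel makes the loop structurally total, series.length steps always suffice
def skipRun (series : List Bool) (v : Bool) : Nat → Nat → Nat
  | 0, i => i
  | fuel + 1, i =>
    if i < series.length ∧ series.getD i false = v then skipRun series v fuel (i + 1) else i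

-- outer while: count maximal runs from index i (fuel as above)
def countRunsFrom (series : List Bool) : Nat → Nat → Int
  | 0, _ => 0
  | fuel + 1, i =>
    if i < series.length then
      1 + countRunsFrom series fuel (skipRun series (series.getD i false) series.length i)
    else 0

-- empty → 0; else runs - 1 + (1 if series[-1] != True else 0)
def solve_alt (series : List Bool) : Int :=
  if series = [] then 0
  else countRunsFrom series series.length 0 - 1
       + (if PySem.List.pyGetD series (-1) false ≠ true then 1 else 0)

-- ===== PRECONDITION & SPEC =====
def Spec_solve (series : List Bool) (out : Int) : Prop := out = solve_alt series
instance (series : List Bool) (out : Int) : Decidable (Spec_solve series out) := by unfold Spec_solve; infer_instance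

-- ===== CLAIM (what is proved, stated in full; the proofs are below) =====
def Claim_equal_solve : Prop := ∀ (series : List Bool), Dom_solve series → Spec_solve series (solve series)

-- ===== LEMMAS AND PROOFS =====

-- A's loop step as a foldr over the list itself
def pvStep (s : Bool × Int) (v : Bool) : Bool × Int :=
  if s.1 ≠ v then (v, s.2 + 1) else s

lemma solve_eq_foldr (series : List Bool) :
    solve series = (series.foldr (fun v s => pvStep s v) (true, 0)).2 := by
  unfold solve
  have h : PySem.List.pyRange ((series.length : Int) - 1) (-1) (-1)
      = (PySem.List.pyRange 0 (series.length : Int) 1).reverse := by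
    have := PySem.List.pyRange_neg_one_eq_reverse ((series.length : Int) - 1) (-1)
    simpa using this
  rw [h]
  have hmap : (PySem.List.pyRange 0 (series.length : Int) 1).map
      (fun j => PySem.List.pyGetD series j false) = series := by
    simpa using PySem.List.map_pyGetD_pyRange_zero series false
  calc ((PySem.List.pyRange 0 (series.length : Int) 1).reverse.foldl
          (fun (s : Bool × Int) i =>
            if s.1 ≠ PySem.List.pyGetD series i false
            then (PySem.List.pyGetD series i false, s.2 + 1) else s) (true, 0)).2
      = (((PySem.List.pyRange 0 (series.length : Int) 1).reverse.map
            (fun j => PySem.List.pyGetD series j false)).foldl pvStep (true, 0)).2 := by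
        rw [List.foldl_map]; rfl
    _ = (series.reverse.foldl pvStep (true, 0)).2 := by
        rw [List.map_reverse, hmap]
    _ = (series.foldr (fun v s => pvStep s v) (true, 0)).2 := by
        rw [List.foldl_reverse]

-- number of adjacent differing pairs, forward
def pvPairSum (l : List Bool) : Int :=
  ((l.zip l.tail).map (fun p => if p.1 ≠ p.2 then (1 : Int) else 0)).sum

-- run count over list suffixes, the clean recursion skipRun/countRunsFrom implement with indices
def runsOf : List Bool → Int
  | [] => 0
  | x :: r => 1 + runsOf (r.dropWhile (· == x))
termination_by l => l.length
decreasing_by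
  have := List.length_dropWhile_le (· == x) r
  simp only [List.length_cons]; omega

lemma skipRun_ge (series : List Bool) (v : Bool) (fuel : Nat) :
    ∀ i, i ≤ skipRun series v fuel i := by
  induction fuel with
  | zero => intro i; simp [skipRun]
  | succ fuel ih =>
    intro i
    rw [skipRun]
    split
    · exact le_trans (by omega) (ih (i + 1))
    · exact le_refl i

lemma skipRun_gt (series : List Bool) (fuel i : Nat) (hf : 0 < fuel)
    (h : i < series.length) :
    i < skipRun series (series.getD i false) fuel i := by
  match fuel with
  | 0 => omega
  | fuel + 1 =>
    rw [skipRun, if_pos ⟨h, rfl⟩]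
    have := skipRun_ge series (series.getD i false) fuel (i + 1)
    omega

lemma skipRun_drop (series : List Bool) (v : Bool) (fuel : Nat) :
    ∀ i, series.length ≤ i + fuel →
      series.drop (skipRun series v fuel i) = (series.drop i).dropWhile (· == v) := by
  induction fuel with
  | zero =>
    intro i hle
    have : series.drop i = [] := List.drop_eq_nil_of_le (by omega)
    simp [skipRun, this]
  | succ fuel ih =>
    intro i hle
    rw [skipRun]
    split
    · rename_i h
      obtain ⟨hlt, hv⟩ := h
      have hd : series.drop i = series[i] :: series.drop (i + 1) :=
        List.drop_eq_getElem_cons hlt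
      have hg : series.getD i false = series[i] := List.getD_eq_getElem series false hlt
      rw [hd, List.dropWhile_cons]
      have : (series[i] == v) = true := by rw [← hg, hv]; simp
      rw [this]
      simp only [if_true]
      exact ih (i + 1) (by omega)
    · rename_i h
      by_cases hlt : i < series.length
      · have hv : ¬ series.getD i false = v := fun e => h ⟨hlt, e⟩
        have hd : series.drop i = series[i] :: series.drop (i + 1) :=
          List.drop_eq_getElem_cons hlt
        have hg : series.getD i false = series[i] := List.getD_eq_getElem series false hlt
        rw [hd, List.dropWhile_cons]
        have : (series[i] == v) = false := by
          rw [← hg]; exact beq_false_of_ne hv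
        rw [this]
        simp [← hd]
      · have : series.drop i = [] := List.drop_eq_nil_of_le (by omega)
        rw [this]; rfl

lemma countRunsFrom_eq (series : List Bool) (fuel : Nat) :
    ∀ i, series.length ≤ i + fuel →
      countRunsFrom series fuel i = runsOf (series.drop i) := by
  induction fuel with
  | zero =>
    intro i hle
    have : series.drop i = [] := List.drop_eq_nil_of_le (by omega)
    simp [countRunsFrom, this, runsOf]
  | succ fuel ih =>
    intro i hle
    rw [countRunsFrom]
    split
    · rename_i hlt
      have hd : series.drop i = series[i] :: series.drop (i + 1) :=
        List.drop_eq_getElem_cons hlt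
      have hg : series.getD i false = series[i] := List.getD_eq_getElem series false hlt
      have hgt : i < skipRun series (series.getD i false) series.length i :=
        skipRun_gt series series.length i (by omega) hlt
      rw [ih (skipRun series (series.getD i false) series.length i) (by omega)]
      rw [skipRun_drop series (series.getD i false) series.length i (by omega)]
      rw [hd, List.dropWhile_cons]
      have : (series[i] == series.getD i false) = true := by rw [hg]; simp
      rw [this]
      simp only [if_true]
      rw [hg]
      conv_rhs => rw [runsOf]
    · rename_i hge
      have : series.drop i = [] := List.drop_eq_nil_of_le (by omega)
      rw [this]
      simp [runsOf]

lemma runsOf_eq_pairSum (l : List Bool) (v : Bool) :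
    runsOf (v :: l) = 1 + pvPairSum (v :: l) := by
  match l with
  | [] => simp [runsOf, pvPairSum]
  | w :: r =>
    by_cases h : w = v
    · subst h
      have h1 : runsOf (w :: w :: r) = runsOf (w :: r) := by
        rw [runsOf, runsOf]
        simp
      have h2 : pvPairSum (w :: w :: r) = pvPairSum (w :: r) := by
        unfold pvPairSum; simp [List.zip]
      rw [h1, h2, runsOf_eq_pairSum r w]
    · have h1 : runsOf (v :: w :: r) = 1 + runsOf (w :: r) := by
        rw [runsOf]
        have : (w == v) = false := beq_false_of_ne h
        simp [this]
      have h2 : pvPairSum (v :: w :: r) = 1 + pvPairSum (w :: r) := by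
        unfold pvPairSum
        have : v ≠ w := fun e => h e.symm
        simp [List.zip, this]
      rw [h1, h2, runsOf_eq_pairSum r w]
termination_by l.length

lemma solve_alt_cons (v : Bool) (l : List Bool) :
    solve_alt (v :: l)
      = (if (v :: l).getLast (by simp) ≠ true then 1 else 0) + pvPairSum (v :: l) := by
  unfold solve_alt
  rw [if_neg (by simp)]
  rw [countRunsFrom_eq (v :: l) (v :: l).length 0 (by omega), List.drop_zero,
    runsOf_eq_pairSum]
  rw [PySem.List.pyGetD_neg_one (v :: l) false (by simp)]
  ring

-- core invariant of A's backward scan: prev_val is the head, changes = boundary + pairwise sum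
lemma core (l : List Bool) (v : Bool) :
    (v :: l).foldr (fun v s => pvStep s v) (true, 0)
      = (v, (if (v :: l).getLast (by simp) ≠ true then 1 else 0) + pvPairSum (v :: l)) := by
  induction l generalizing v with
  | nil =>
    simp only [List.foldr, pvStep, pvPairSum]
    by_cases h : v = true <;> simp [h]
  | cons w r ih =>
    have hv : (v :: w :: r).foldr (fun v s => pvStep s v) (true, 0)
        = pvStep ((w :: r).foldr (fun v s => pvStep s v) (true, 0)) v := rfl
    rw [hv, ih w]
    have hlast : (v :: w :: r).getLast (by simp) = (w :: r).getLast (by simp) := by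
      simp [List.getLast]
    have hps : pvPairSum (v :: w :: r) = (if v ≠ w then 1 else 0) + pvPairSum (w :: r) := by
      unfold pvPairSum; simp [List.zip]
    rw [hlast, hps]
    unfold pvStep
    by_cases h : w = v
    · simp [h]
    · have h' : ¬ v = w := fun e => h e.symm
      simp [h, h']
      ring

-- ===== VERDICT (by name: the statement is the Claim_ definition above) =====
theorem solve_spec : Claim_equal_solve := by
  intro series _
  unfold Spec_solve
  rw [solve_eq_foldr]
  cases series with
  | nil => rfl
  | cons v l =>
    rw [core l v, solve_alt_cons]
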